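-- pv_equiv track=rewrite | github.com/Kaoutherbo/CP-Python | set19.py | sale
-- ===== SOURCE A (Python) =====
-- def sale(nums, m):
--     nums.sort()
--     money = 0
--
--     for num in nums:
--         if num <= 0 and m > 0:
--             money += abs(num)
--             m -= 1
--
--     return money
-- ===== SOURCE B (Python) =====
-- def _sum_smallest(k, xs):
--     # sum of the k smallest elements of xs (quickselect: middle pivot, 3-way partition)
--     if k <= 0:
--         return 0
--     if k >= len(xs):
--         return sum(xs)
--     p = xs[len(xs) // 2]
--     lt = [x for x in xs if x < p]
--     eq = [x for x in xs if x == p]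
--     gt = [x for x in xs if x > p]
--     if k <= len(lt):
--         return _sum_smallest(k, lt)
--     if k <= len(lt) + len(eq):
--         return sum(lt) + (k - len(lt)) * p
--     return sum(lt) + len(eq) * p + _sum_smallest(k - len(lt) - len(eq), gt)
--
-- def sale(nums, m):
--     nonpos = [x for x in nums if x <= 0]
--     return -_sum_smallest(min(m, len(nonpos)), nonpos)
-- ===== Notes on version B (the rewrite author's own statement) =====
-- stated objective: alternative
-- what changed: A sorts the whole list and scans it with a decrementing counter; B filters the non-positive elements and sums the m smallest of them by quickselect-style middle-pivot three-way partitioning, with no sort at all.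
import Mathlib
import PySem

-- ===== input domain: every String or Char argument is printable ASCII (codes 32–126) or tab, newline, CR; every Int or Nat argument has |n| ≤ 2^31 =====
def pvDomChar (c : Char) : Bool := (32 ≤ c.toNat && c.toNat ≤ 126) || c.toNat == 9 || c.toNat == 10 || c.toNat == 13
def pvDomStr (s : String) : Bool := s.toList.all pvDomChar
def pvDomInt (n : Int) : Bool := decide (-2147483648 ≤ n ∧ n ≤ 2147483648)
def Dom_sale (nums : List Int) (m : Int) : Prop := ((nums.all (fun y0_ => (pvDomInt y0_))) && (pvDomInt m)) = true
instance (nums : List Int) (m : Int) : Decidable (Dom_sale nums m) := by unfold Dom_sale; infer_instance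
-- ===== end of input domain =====

-- B replaces A's sort-then-scan by a quickselect-style partition recursion over the
-- non-positive elements (objective: alternative). A sorts its argument in place; B does not
-- mutate it — the equivalence proved here is about the RETURN value only.

-- ===== PORT A =====
def sale (nums : List Int) (m : Int) : Int :=
  ((PySem.List.sorted nums (fun x => x) false).foldl
    (fun st num => if num ≤ 0 ∧ st.2 > 0 then (st.1 + |num|, st.2 - 1) else st)
    (0, m)).1

-- ===== PORT B =====
-- sum of the k smallest elements of xs (quickselect: middle pivot, 3-way partition, as in Source B)
def sumSmallest (k : Int) (xs : List Int) : Int :=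
  if hk : k ≤ 0 then 0
  else if hl : (xs.length : Int) ≤ k then xs.sum
  else
    -- xs[len(xs) // 2]: this branch guarantees xs ≠ [], so the index is in range and getD is exact
    let p := xs.getD (xs.length / 2) 0
    let lt := xs.filter (fun x => decide (x < p))
    let eq := xs.filter (fun x => decide (x = p))
    let gt := xs.filter (fun x => decide (p < x))
    if k ≤ (lt.length : Int) then sumSmallest k lt
    else if k ≤ (lt.length : Int) + eq.length then lt.sum + (k - lt.length) * p
    else lt.sum + (eq.length : Int) * p + sumSmallest (k - lt.length - eq.length) gt
termination_by xs.length
decreasing_by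
  all_goals
    simp only [List.length_unattach]
    have hne : xs ≠ [] := by
      intro h; subst h; simp at hl; omega
    have hidx : xs.length / 2 < xs.length := by
      have := List.length_pos_iff.2 hne; omega
    have hp : xs.getD (xs.length / 2) 0 ∈ xs := by
      rw [List.getD_eq_getElem xs 0 hidx]; exact List.getElem_mem hidx
    conv_rhs => rw [← List.length_attach (l := xs)]
    exact List.length_filter_lt_length_iff_exists.2 ⟨⟨_, hp⟩, List.mem_attach _ _, by simp⟩

def sale_alt (nums : List Int) (m : Int) : Int :=
  let nonpos := nums.filter (fun x => decide (x ≤ 0));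
  -(sumSmallest (min m (nonpos.length : Int)) nonpos)

-- ===== PRECONDITION & SPEC =====
def Spec_sale (nums : List Int) (m : Int) (out : Int) : Prop := out = sale_alt nums m
instance (nums : List Int) (m : Int) (out : Int) : Decidable (Spec_sale nums m out) := by unfold Spec_sale; infer_instance

-- ===== CLAIM (what is proved, stated in full; the proofs are below) =====
def Claim_equal_sale : Prop := ∀ (nums : List Int) (m : Int), Dom_sale nums m → Spec_sale nums m (sale nums m)

-- ===== LEMMAS AND PROOFS =====

-- A's loop: subtracts each non-positive element (adds its absolute value) while the counter is positive
theorem sale_foldl_char (l : List Int) (money m : Int) :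
    (l.foldl (fun st num => if num ≤ 0 ∧ st.2 > 0 then (st.1 + |num|, st.2 - 1) else st)
      (money, m)).1
      = money - ((l.filter (fun x => decide (x ≤ 0))).take m.toNat).sum := by
  induction l generalizing money m with
  | nil => simp
  | cons x l ih =>
    simp only [List.foldl_cons, List.filter_cons]
    by_cases hx : x ≤ 0
    · by_cases hm : m > 0
      · have hmt : m.toNat = (m - 1).toNat + 1 := by omega
        rw [if_pos ⟨hx, hm⟩, ih, if_pos (by simpa using hx), hmt, List.take_succ_cons,
          List.sum_cons]
        have hax : |x| = -x := abs_of_nonpos hx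
        rw [hax]; ring
      · have hmt : m.toNat = 0 := by omega
        rw [if_neg (by tauto), ih, hmt, List.take_zero, List.sum_nil, List.take_zero,
          List.sum_nil]
    · rw [if_neg (by tauto), ih, if_neg (by simpa using hx)]

-- filtering a sorted Int list = sorting the filtered list (sorted Int lists are multiset-determined)
theorem filter_sorted_eq (nums : List Int) (p : Int → Bool) :
    (PySem.List.sorted nums (fun x => x) false).filter p
      = PySem.List.sorted (nums.filter p) (fun x => x) false := by
  symm
  apply PySem.List.sorted_id_eq_of_perm_of_pairwise
  · exact (PySem.List.sorted_perm nums (fun x => x) false).filter p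
  · exact List.Pairwise.sublist (List.filter_sublist)
      (by simpa using PySem.List.sorted_pairwise nums (fun x => x))

-- the eq-bucket of the partition is a replicate of the pivot
theorem eq_filter_replicate (p : Int) (xs : List Int) :
    xs.filter (fun x => decide (x = p)) = List.replicate (xs.filter (fun x => decide (x = p))).length p := by
  apply List.eq_replicate_of_mem
  intro b hb
  simpa using (List.mem_filter.1 hb).2

-- 3-way partitioning at a pivot decomposes the sorted list
theorem sorted_partition3 (p : Int) (xs : List Int) :
    PySem.List.sorted xs (fun x => x) false
      = PySem.List.sorted (xs.filter (fun x => decide (x < p))) (fun x => x) false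
        ++ xs.filter (fun x => decide (x = p))
        ++ PySem.List.sorted (xs.filter (fun x => decide (p < x))) (fun x => x) false := by
  apply PySem.List.sorted_id_eq_of_perm_of_pairwise
  · have hlt := PySem.List.sorted_perm (xs.filter (fun x => decide (x < p))) (fun x => x) false
    have hgt := PySem.List.sorted_perm (xs.filter (fun x => decide (p < x))) (fun x => x) false
    have h1 := List.filter_append_perm (fun x => decide (x < p)) xs
    have h2 := List.filter_append_perm (fun x => decide (x = p)) (xs.filter (fun x => !decide (x < p)))
    rw [List.filter_filter, List.filter_filter] at h2
    have e1 : (fun a : Int => decide (a = p) && !decide (a < p)) = (fun x => decide (x = p)) := by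
      funext x; by_cases h : x = p <;> simp [h]
    have e2 : (fun a : Int => !decide (a = p) && !decide (a < p)) = (fun x => decide (p < x)) := by
      funext x; by_cases h : x = p <;> by_cases h' : x < p <;> simp [h, h'] <;> omega
    rw [e1, e2] at h2
    rw [List.append_assoc]
    exact ((hlt.append ((List.Perm.refl _).append hgt)).trans
      (((List.Perm.refl _).append h2).trans h1))
  · rw [List.append_assoc, List.pairwise_append]
    have hltmem : ∀ a ∈ PySem.List.sorted (xs.filter (fun x => decide (x < p))) (fun x => x) false, a < p := by
      intro a ha
      have := (PySem.List.mem_sorted _ _ _ _).1 ha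
      simpa using (List.mem_filter.1 this).2
    have heqmem : ∀ a ∈ xs.filter (fun x => decide (x = p)), a = p := by
      intro a ha; simpa using (List.mem_filter.1 ha).2
    have hgtmem : ∀ a ∈ PySem.List.sorted (xs.filter (fun x => decide (p < x))) (fun x => x) false, p < a := by
      intro a ha
      have := (PySem.List.mem_sorted _ _ _ _).1 ha
      simpa using (List.mem_filter.1 this).2
    refine ⟨by simpa using PySem.List.sorted_pairwise (xs.filter (fun x => decide (x < p))) (fun x => x), ?_, ?_⟩
    · rw [List.pairwise_append]
      refine ⟨?_, by simpa using PySem.List.sorted_pairwise (xs.filter (fun x => decide (p < x))) (fun x => x), ?_⟩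
      · rw [eq_filter_replicate p xs]
        exact List.pairwise_replicate.2 (Or.inr le_rfl)
      · intro a ha b hb
        rw [heqmem a ha]
        exact le_of_lt (hgtmem b hb)
    · intro a ha b hb
      rcases List.mem_append.1 hb with hb' | hb'
      · rw [heqmem b hb']; exact le_of_lt (hltmem a ha)
      · exact le_of_lt (lt_trans (hltmem a ha) (hgtmem b hb'))

theorem sumSmallest_spec_aux : ∀ (n : Nat) (xs : List Int), xs.length ≤ n → ∀ (k : Int),
    sumSmallest k xs = ((PySem.List.sorted xs (fun x => x) false).take k.toNat).sum := by
  intro n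
  induction n with
  | zero =>
    intro xs hlen k
    have : xs = [] := List.eq_nil_of_length_eq_zero (Nat.le_zero.1 hlen)
    subst this
    rw [sumSmallest.eq_def]
    by_cases hk : k ≤ 0
    · rw [dif_pos hk]; simp [PySem.List.sorted]
    · rw [dif_neg hk, dif_pos (by simp; omega)]
      simp [PySem.List.sorted]
  | succ n ih =>
    intro xs hlen k
    rw [sumSmallest.eq_def]
    by_cases hk : k ≤ 0
    · have : k.toNat = 0 := by omega
      simp [hk, this]
    · rw [dif_neg hk]
      by_cases hl : (xs.length : Int) ≤ k
      · rw [dif_pos hl]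
        have hlen' : (PySem.List.sorted xs (fun x => x) false).length ≤ k.toNat := by
          rw [PySem.List.length_sorted]; omega
        rw [List.take_of_length_le hlen',
          (PySem.List.sorted_perm xs (fun x => x) false).sum_eq]
      · rw [dif_neg hl]
        simp only
        set p := xs.getD (xs.length / 2) 0 with hp
        set lt := xs.filter (fun x => decide (x < p)) with hlt
        set eq := xs.filter (fun x => decide (x = p)) with heq
        set gt := xs.filter (fun x => decide (p < x)) with hgt
        have hne : xs ≠ [] := by intro h; subst h; simp at hl; omega
        have hidx : xs.length / 2 < xs.length := by
          have := List.length_pos_iff.2 hne; omega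
        have hpmem : p ∈ xs := by
          rw [hp, List.getD_eq_getElem xs 0 hidx]; exact List.getElem_mem hidx
        have hltlen : lt.length ≤ n := by
          have : lt.length < xs.length :=
            List.length_filter_lt_length_iff_exists.2 ⟨p, hpmem, by simp⟩
          omega
        have hgtlen : gt.length ≤ n := by
          have : gt.length < xs.length :=
            List.length_filter_lt_length_iff_exists.2 ⟨p, hpmem, by simp⟩
          omega
        have hslt : (PySem.List.sorted lt (fun x => x) false).length = lt.length :=
          PySem.List.length_sorted _ _ _
        have hsltsum : (PySem.List.sorted lt (fun x => x) false).sum = lt.sum :=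
          (PySem.List.sorted_perm lt (fun x => x) false).sum_eq
        rw [sorted_partition3 p xs, ← hlt, ← heq, ← hgt]
        by_cases hkl : k ≤ (lt.length : Int)
        · rw [if_pos hkl, ih lt hltlen k,
            List.take_append_of_le_length (by simp [hslt]; omega),
            List.take_append_of_le_length (by rw [hslt]; omega)]
        · rw [if_neg hkl]
          by_cases hke : k ≤ (lt.length : Int) + eq.length
          · rw [if_pos hke,
              List.take_append_of_le_length (by simp [hslt]; omega),
              List.take_append, List.take_of_length_le (by omega), hslt, List.sum_append,
              hsltsum]
            have htr : List.take (k.toNat - lt.length) eq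
                = List.replicate (k.toNat - lt.length) p := by
              rw [heq, eq_filter_replicate p xs, List.take_replicate]
              congr 1
              rw [← heq]
              omega
            rw [htr, List.sum_replicate, nsmul_eq_mul]
            have : ((k.toNat - lt.length : Nat) : Int) = k - lt.length := by omega
            rw [this]
          · have h3 : ((PySem.List.sorted lt (fun x => x) false) ++ eq).length ≤ k.toNat := by
              rw [List.length_append, hslt]; omega
            rw [if_neg hke, ih gt hgtlen (k - lt.length - eq.length), List.take_append,
              List.take_of_length_le h3, List.length_append, hslt, List.sum_append,
              List.sum_append, hsltsum]
            have heqsum : eq.sum = (eq.length : Int) * p := by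
              conv_lhs => rw [heq, eq_filter_replicate p xs]
              rw [List.sum_replicate, nsmul_eq_mul, ← heq]
            have htn : (k - (lt.length : Int) - eq.length).toNat
                = k.toNat - (lt.length + eq.length) := by omega
            rw [heqsum, htn]

theorem sale_eq (nums : List Int) (m : Int) : sale nums m = sale_alt nums m := by
  unfold sale sale_alt
  rw [sale_foldl_char, filter_sorted_eq]
  show _ = -(sumSmallest (min m ((nums.filter (fun x => decide (x ≤ 0))).length : Int))
      (nums.filter (fun x => decide (x ≤ 0))))
  rw [sumSmallest_spec_aux (nums.filter (fun x => decide (x ≤ 0))).length _ le_rfl]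
  have hml : ((PySem.List.sorted (nums.filter (fun x => decide (x ≤ 0))) (fun x => x) false).take
      m.toNat).sum
      = ((PySem.List.sorted (nums.filter (fun x => decide (x ≤ 0))) (fun x => x) false).take
      (min m ((nums.filter (fun x => decide (x ≤ 0))).length : Int)).toNat).sum := by
    by_cases h : m ≤ ((nums.filter (fun x => decide (x ≤ 0))).length : Int)
    · rw [min_eq_left h]
    · have hlen := PySem.List.length_sorted (nums.filter (fun x => decide (x ≤ 0))) (fun x => x) false
      rw [min_eq_right (by omega), List.take_of_length_le (by omega),
        List.take_of_length_le (by omega)]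
  rw [hml]; ring

-- ===== VERDICT (by name: the statement is the Claim_ definition above) =====
theorem sale_spec : Claim_equal_sale := by
  intro nums m _
  exact sale_eq nums m
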